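-- pv_equiv track=rewrite | github.com/KianMiridoozini/hackerrank-orchestrate-may26 | code/safety.py | _match_rule_groups
-- ===== SOURCE A (Python) =====
-- from typing import Final, Sequence
--
-- def _match_rule_groups(
-- 	text: str,
-- 	rule_groups: Sequence[tuple[str, Sequence[str]]],
-- ) -> tuple[str, ...]:
-- 	matched_rules: list[str] = []
-- 	for rule_name, phrases in rule_groups:
-- 		if any(phrase in text for phrase in phrases):
-- 			matched_rules.append(rule_name)
-- 	return tuple(matched_rules)
-- ===== SOURCE B (Python) =====
-- def _match_rule_groups(text, rule_groups):
-- 	phrase_set = {phrase for _, phrases in rule_groups for phrase in phrases}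
-- 	lengths = {len(phrase) for phrase in phrase_set}
-- 	matched = set()
-- 	for start in range(len(text) + 1):
-- 		for length in lengths:
-- 			window = text[start:start + length]
-- 			if len(window) == length and window in phrase_set:
-- 				matched.add(window)
-- 	return tuple(name for name, phrases in rule_groups if any(phrase in matched for phrase in phrases))
-- ===== Notes on version B (the rewrite author's own statement) =====
-- stated objective: alternative
-- what changed: A asks per rule whether any of its phrases is a substring (repeated phrase-major substring searches); B builds a hash set of all phrases and their lengths once, makes a single position-major scan of the text looking each window of a phrase length up in the set, and then filters the rules against the matched-phrase set.
import Mathlib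
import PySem

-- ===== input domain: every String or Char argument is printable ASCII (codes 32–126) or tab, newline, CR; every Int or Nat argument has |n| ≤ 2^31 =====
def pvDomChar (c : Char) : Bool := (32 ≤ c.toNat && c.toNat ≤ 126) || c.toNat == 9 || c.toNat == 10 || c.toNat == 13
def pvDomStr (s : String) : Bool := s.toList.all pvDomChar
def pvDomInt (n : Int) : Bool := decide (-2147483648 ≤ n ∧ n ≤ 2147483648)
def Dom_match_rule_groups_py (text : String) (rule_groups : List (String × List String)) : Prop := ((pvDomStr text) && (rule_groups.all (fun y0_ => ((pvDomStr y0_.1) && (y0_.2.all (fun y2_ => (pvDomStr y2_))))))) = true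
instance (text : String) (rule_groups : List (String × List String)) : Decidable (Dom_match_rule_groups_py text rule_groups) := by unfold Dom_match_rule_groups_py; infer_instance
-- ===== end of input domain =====

-- B replaces A's phrase-major `phrase in text` loop by a single position-major scan of the text:
-- a hash set of the phrases and their lengths is built once, each text window of a phrase length
-- is looked up in it, and the rules are then filtered against the set of matched phrases
-- (alternative algorithm, same return value).

-- ===== PORT A =====
-- A: for each (rule_name, phrases), append rule_name if any phrase is a substring of text.
def match_rule_groups_py (text : String) (rule_groups : List (String × List String)) : List String :=
  rule_groups.foldl
    (fun matched_rules p =>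
      if p.2.any (fun phrase => PySem.Str.isIn phrase text) then matched_rules ++ [p.1]
      else matched_rules)
    []

-- ===== PORT B =====
-- B: the scan over the start positions 0..len(text); at each position every phrase length is
-- tried: `text[start:start+length]` is Str.slice, and a window of full length that is in the
-- phrase set is recorded as matched.
def pvScan (text : String) (phraseSet : PySem.Set String) (lengths : List Int) :
    PySem.Set String :=
  (PySem.List.pyRange 0 (PySem.Str.len text + 1)).foldl
    (fun matched start =>
      lengths.foldl
        (fun m length =>
          let window := PySem.Str.slice text (some start) (some (start + length))
          if PySem.Str.len window == length && PySem.Set.contains phraseSet window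
          then PySem.Set.add m window else m)
        matched)
    PySem.Set.empty

def match_rule_groups_py_alt (text : String) (rule_groups : List (String × List String)) : List String :=
  let phraseSet := PySem.Set.ofList (rule_groups.flatMap (fun p => p.2))
  let lengths := PySem.Set.ofList (phraseSet.map (fun phrase => PySem.Str.len phrase))
  let matched := pvScan text phraseSet lengths
  (rule_groups.filter (fun p => p.2.any (fun phrase => PySem.Set.contains matched phrase))).map
    (fun p => p.1)

-- ===== PRECONDITION & SPEC =====
def Spec_match_rule_groups_py (text : String) (rule_groups : List (String × List String)) (out : List String) : Prop := out = match_rule_groups_py_alt text rule_groups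
instance (text : String) (rule_groups : List (String × List String)) (out : List String) : Decidable (Spec_match_rule_groups_py text rule_groups out) := by unfold Spec_match_rule_groups_py; infer_instance

-- ===== CLAIM (what is proved, stated in full; the proofs are below) =====
def Claim_equal_match_rule_groups_py : Prop := ∀ (text : String) (rule_groups : List (String × List String)), Dom_match_rule_groups_py text rule_groups → Spec_match_rule_groups_py text rule_groups (match_rule_groups_py text rule_groups)

-- ===== LEMMAS AND PROOFS =====

-- Membership in a conditional-add fold over a set.
theorem pvMem_foldl_addIf {α : Type} (l : List α) (c : α → Bool) (f : α → String)
    (m : PySem.Set String) (ph : String) :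
    ph ∈ l.foldl (fun m x => if c x then PySem.Set.add m (f x) else m) m
      ↔ ph ∈ m ∨ ∃ x ∈ l, c x = true ∧ ph = f x := by
  induction l generalizing m with
  | nil => simp
  | cons x t ih =>
    simp only [List.foldl_cons, ih, List.mem_cons]
    cases hcx : c x with
    | false =>
      simp only [Bool.false_eq_true, if_false]
      constructor
      · rintro (h | ⟨y, hy, h1, h2⟩)
        · exact Or.inl h
        · exact Or.inr ⟨y, Or.inr hy, h1, h2⟩
      · rintro (h | ⟨y, (rfl | hy), h1, h2⟩)
        · exact Or.inl h
        · exact absurd h1 (by simp [hcx])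
        · exact Or.inr ⟨y, hy, h1, h2⟩
    | true =>
      simp only [if_true, PySem.Set.mem_add]
      constructor
      · rintro ((h | rfl) | ⟨y, hy, h1, h2⟩)
        · exact Or.inl h
        · exact Or.inr ⟨x, Or.inl rfl, hcx, rfl⟩
        · exact Or.inr ⟨y, Or.inr hy, h1, h2⟩
      · rintro (h | ⟨y, (rfl | hy), h1, h2⟩)
        · exact Or.inl (Or.inl h)
        · exact Or.inl (Or.inr h2)
        · exact Or.inr ⟨y, hy, h1, h2⟩

-- Membership after the whole scan, over any list of start positions.
theorem pvScan_outer_mem (text : String) (phraseSet : PySem.Set String) (lengths : List Int)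
    (js : List Int) (init : PySem.Set String) (ph : String) :
    ph ∈ js.foldl
        (fun matched start =>
          lengths.foldl
            (fun m length =>
              let window := PySem.Str.slice text (some start) (some (start + length))
              if PySem.Str.len window == length && PySem.Set.contains phraseSet window
              then PySem.Set.add m window else m)
            matched) init
      ↔ ph ∈ init ∨ ∃ j ∈ js, ∃ L ∈ lengths,
          (PySem.Str.len (PySem.Str.slice text (some j) (some (j + L))) == L
            && PySem.Set.contains phraseSet (PySem.Str.slice text (some j) (some (j + L)))) = true
          ∧ ph = PySem.Str.slice text (some j) (some (j + L)) := by
  induction js generalizing init with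
  | nil => simp
  | cons j t ih =>
    simp only [List.foldl_cons, ih]
    rw [pvMem_foldl_addIf lengths
      (fun L => PySem.Str.len (PySem.Str.slice text (some j) (some (j + L))) == L
          && PySem.Set.contains phraseSet (PySem.Str.slice text (some j) (some (j + L))))
      (fun L => PySem.Str.slice text (some j) (some (j + L)))]
    simp only [List.mem_cons]
    constructor
    · rintro ((h | ⟨L, hL, h1, h2⟩) | ⟨j', hj', L, hL, h1, h2⟩)
      · exact Or.inl h
      · exact Or.inr ⟨j, Or.inl rfl, L, hL, h1, h2⟩
      · exact Or.inr ⟨j', Or.inr hj', L, hL, h1, h2⟩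
    · rintro (h | ⟨j', (rfl | hj'), L, hL, h1, h2⟩)
      · exact Or.inl (Or.inl h)
      · exact Or.inl (Or.inr ⟨L, hL, h1, h2⟩)
      · exact Or.inr ⟨j', hj', L, hL, h1, h2⟩

-- A window of some phrase length equals ph at some scanned position iff ph is in the phrase set
-- and is a substring of the text.
theorem pvWindow_iff_isIn (text : String) (phraseSet : PySem.Set String) (lengths : List Int)
    (hlen : ∀ q ∈ phraseSet, PySem.Str.len q ∈ lengths)
    (hL0 : ∀ L ∈ lengths, 0 ≤ L) (ph : String) :
    (∃ j ∈ PySem.List.pyRange 0 (PySem.Str.len text + 1), ∃ L ∈ lengths,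
        (PySem.Str.len (PySem.Str.slice text (some j) (some (j + L))) == L
          && PySem.Set.contains phraseSet (PySem.Str.slice text (some j) (some (j + L)))) = true
        ∧ ph = PySem.Str.slice text (some j) (some (j + L)))
      ↔ ph ∈ phraseSet ∧ PySem.Str.isIn ph text = true := by
  have hisin : PySem.Str.isIn ph text = PySem.Chars.isIn ph.toList text.toList := by
    simp [PySem.Str.isIn_eq]
  constructor
  · rintro ⟨j, hj, L, hL, hcond, rfl⟩
    have hj0 : 0 ≤ j := (PySem.List.mem_pyRange_one.mp hj).1
    have hL0' : 0 ≤ L := hL0 L hL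
    rw [Bool.and_eq_true] at hcond
    obtain ⟨hlenw, hcontains⟩ := hcond
    refine ⟨(PySem.Set.contains_iff _ _).mp hcontains, ?_⟩
    rw [hisin, ← PySem.Chars.exists_prefix_drop_iff_isIn]
    refine ⟨j.toNat, ?_⟩
    have hslice : (PySem.Str.slice text (some j) (some (j + L))).toList
        = List.take L.toNat (List.drop j.toNat text.toList) := by
      rw [PySem.Str.toList_slice]
      show PySem.List.slice text.toList (some j) (some (j + L))
          = List.take L.toNat (List.drop j.toNat text.toList)
      rw [PySem.List.slice_toNat text.toList hj0 (by omega)]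
      congr 1
      omega
    rw [hslice]
    exact List.take_prefix _ _
  · rintro ⟨hmem, hsub⟩
    rw [hisin, ← PySem.Chars.exists_prefix_drop_iff_isIn] at hsub
    obtain ⟨j, hpre⟩ := hsub
    -- clamp j to at most len(text)
    obtain ⟨j, hjle, hpre⟩ :
        ∃ j, j ≤ text.toList.length ∧ ph.toList <+: List.drop j text.toList := by
      by_cases hle : j ≤ text.toList.length
      · exact ⟨j, hle, hpre⟩
      · refine ⟨text.toList.length, le_refl _, ?_⟩
        have hnil : List.drop j text.toList = [] := List.drop_eq_nil_of_le (by omega)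
        have hempty : ph.toList = [] := List.prefix_nil.mp (hnil ▸ hpre)
        rw [hempty]
        exact List.nil_prefix
    have hLmem : PySem.Str.len ph ∈ lengths := hlen ph hmem
    refine ⟨(j : Int), ?_, PySem.Str.len ph, hLmem, ?_⟩
    · rw [PySem.List.mem_pyRange_one, PySem.Str.len_eq]
      constructor
      · exact_mod_cast Int.natCast_nonneg j
      · exact_mod_cast Nat.lt_succ_of_le hjle
    · have hslice : (PySem.Str.slice text (some (j : Int))
          (some ((j : Int) + PySem.Str.len ph))).toList = ph.toList := by
        rw [PySem.Str.toList_slice]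
        show PySem.List.slice text.toList (some (j : Int))
            (some ((j : Int) + PySem.Str.len ph)) = ph.toList
        have h0j : (0 : Int) ≤ (j : Int) := Int.natCast_nonneg j
        have h0L : (0 : Int) ≤ PySem.Str.len ph := by
          rw [PySem.Str.len_eq]; exact Int.natCast_nonneg _
        rw [PySem.List.slice_toNat text.toList h0j (by omega)]
        have htn : ((j : Int) + PySem.Str.len ph).toNat - (j : Int).toNat
            = ph.toList.length := by
          rw [PySem.Str.len_eq]; omega
        rw [htn]
        exact (List.prefix_iff_eq_take.mp hpre).symm
      have hwph : PySem.Str.slice text (some (j : Int))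
          (some ((j : Int) + PySem.Str.len ph)) = ph := String.toList_inj.mp hslice
      rw [hwph]
      refine ⟨?_, rfl⟩
      rw [Bool.and_eq_true]
      exact ⟨beq_iff_eq.mpr rfl, (PySem.Set.contains_iff _ _).mpr hmem⟩

-- The scan computes exactly the phrases of the set that occur in the text.
theorem pvScan_mem (text : String) (phraseSet : PySem.Set String) (lengths : List Int)
    (hlen : ∀ q ∈ phraseSet, PySem.Str.len q ∈ lengths)
    (hL0 : ∀ L ∈ lengths, 0 ≤ L) (ph : String) :
    ph ∈ pvScan text phraseSet lengths
      ↔ ph ∈ phraseSet ∧ PySem.Str.isIn ph text = true := by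
  unfold pvScan
  rw [pvScan_outer_mem]
  simp only [PySem.Set.empty]
  rw [← pvWindow_iff_isIn text phraseSet lengths hlen hL0 ph]
  constructor
  · rintro (h | h)
    · simp at h
    · exact h
  · exact Or.inr

-- ===== VERDICT (by name: the statement is the Claim_ definition above) =====
theorem match_rule_groups_py_spec : Claim_equal_match_rule_groups_py := by
  intro text rule_groups _
  unfold Spec_match_rule_groups_py match_rule_groups_py match_rule_groups_py_alt
  rw [PySem.List.foldl_append_if (p := fun p : String × List String =>
        p.2.any (fun phrase => PySem.Str.isIn phrase text)) (f := fun p => p.1)]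
  rw [List.nil_append]
  congr 1
  apply List.filter_congr
  intro p hp
  apply PySem.List.any_congr_mem
  intro ph hph
  have hmem : ph ∈ PySem.Set.ofList (rule_groups.flatMap (fun p => p.2)) :=
    (PySem.Set.mem_ofList _ _).mpr (List.mem_flatMap.mpr ⟨p, hp, hph⟩)
  have hlen : ∀ q ∈ PySem.Set.ofList (rule_groups.flatMap (fun p => p.2)),
      PySem.Str.len q ∈ PySem.Set.ofList
        ((PySem.Set.ofList (rule_groups.flatMap (fun p => p.2))).map
          (fun phrase => PySem.Str.len phrase)) := by
    intro q hq
    exact (PySem.Set.mem_ofList _ _).mpr (List.mem_map_of_mem hq)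
  have hL0 : ∀ L ∈ PySem.Set.ofList
      ((PySem.Set.ofList (rule_groups.flatMap (fun p => p.2))).map
        (fun phrase => PySem.Str.len phrase)), 0 ≤ L := by
    intro L hL
    obtain ⟨q, _, rfl⟩ := List.mem_map.mp ((PySem.Set.mem_ofList _ _).mp hL)
    rw [PySem.Str.len_eq]
    exact Int.natCast_nonneg _
  have hscan := pvScan_mem text (PySem.Set.ofList (rule_groups.flatMap (fun p => p.2)))
      (PySem.Set.ofList ((PySem.Set.ofList (rule_groups.flatMap (fun p => p.2))).map
        (fun phrase => PySem.Str.len phrase))) hlen hL0 ph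
  by_cases h : PySem.Str.isIn ph text = true
  · rw [h]
    exact ((PySem.Set.contains_iff _ ph).mpr (hscan.mpr ⟨hmem, h⟩)).symm
  · have h' : PySem.Str.isIn ph text = false := Bool.eq_false_iff.mpr h
    rw [h', eq_comm, Bool.eq_false_iff]
    intro hc
    exact h (hscan.mp ((PySem.Set.contains_iff _ ph).mp hc)).2
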